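-- pv_equiv track=rewrite | github.com/Kobzol/advent-of-code | 2022/day17.py | generate_landscape_key
-- ===== SOURCE A (Python) =====
-- from typing import List, Optional, Set, Tuple
--
-- Point = Tuple[int, int]
--
-- def generate_landscape_key(map: Set[Point]):
--     key = []
--     for col in range(7):
--         max_y = max((m[0] for m in map if m[1] == col), default=-1) + 1
--         key.append(max_y)
--
--     min_y = min(key)
--     key = [y - min_y for y in key]
--     return tuple(key)
-- ===== SOURCE B (Python) =====
-- def generate_landscape_key(map):
--     heights = [None] * 7
--     for (y, col) in map:
--         if 0 <= col < 7 and (heights[col] is None or y > heights[col]):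
--             heights[col] = y
--     key = [0 if h is None else h + 1 for h in heights]
--     min_y = min(key)
--     return tuple(k - min_y for k in key)
-- ===== Notes on version B (the rewrite author's own statement) =====
-- stated objective: simpler
-- what changed: Replaces the 7 per-column rescans (a generator-filtered max per column) with a single pass over the point set that maintains a 7-entry per-column running-maximum table, then normalizes.
import Mathlib
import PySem

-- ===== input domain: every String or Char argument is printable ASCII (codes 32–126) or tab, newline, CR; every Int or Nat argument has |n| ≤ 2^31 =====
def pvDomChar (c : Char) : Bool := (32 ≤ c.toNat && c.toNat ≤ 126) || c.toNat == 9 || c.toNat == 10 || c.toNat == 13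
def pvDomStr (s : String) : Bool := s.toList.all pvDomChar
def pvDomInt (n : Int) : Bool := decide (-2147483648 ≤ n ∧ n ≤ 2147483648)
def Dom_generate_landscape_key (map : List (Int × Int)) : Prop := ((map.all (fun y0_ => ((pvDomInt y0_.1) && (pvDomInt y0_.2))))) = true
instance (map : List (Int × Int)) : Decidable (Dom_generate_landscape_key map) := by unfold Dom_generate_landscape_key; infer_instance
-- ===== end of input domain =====

-- B replaces A's 7 filtered rescans by one pass over the points keeping a per-column running max (simpler single traversal).
-- ===== PORT A =====
-- min(key) is taken of a list that always has 7 elements, so min? is never none; getD 0 is unreachable.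
def generate_landscape_key (map : List (Int × Int)) : List Int :=
  let key := (PySem.List.pyRange 0 7 1).foldl (fun key col =>
    let max_y := ((PySem.List.max? ((map.filter (fun m => m.2 == col)).map (fun m => m.1)) (fun y => y)).getD (-1)) + 1
    key ++ [max_y]) []
  let min_y := (PySem.List.min? key (fun y => y)).getD 0
  key.map (fun y => y - min_y)

-- ===== PORT B =====
-- body of B's for-loop, as a named step function of the fold
def pvStepB (hs : List (Option Int)) (m : Int × Int) : List (Option Int) :=
  if 0 ≤ m.2 ∧ m.2 < 7 then
    match hs.getD m.2.toNat none with
    | none => hs.set m.2.toNat (some m.1)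
    | some h => if m.1 > h then hs.set m.2.toNat (some m.1) else hs
  else hs

def generate_landscape_key_alt (map : List (Int × Int)) : List Int :=
  let heights := map.foldl pvStepB (List.replicate 7 (none : Option Int))
  let key := heights.map (fun h => match h with | none => 0 | some h => h + 1)
  let min_y := (PySem.List.min? key (fun y => y)).getD 0
  key.map (fun k => k - min_y)

-- ===== PRECONDITION & SPEC =====
def Spec_generate_landscape_key (map : List (Int × Int)) (out : List Int) : Prop := out = generate_landscape_key_alt map
instance (map : List (Int × Int)) (out : List Int) : Decidable (Spec_generate_landscape_key map out) := by unfold Spec_generate_landscape_key; infer_instance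

-- ===== CLAIM (what is proved, stated in full; the proofs are below) =====
def Claim_equal_generate_landscape_key : Prop := ∀ (map : List (Int × Int)), Dom_generate_landscape_key map → Spec_generate_landscape_key map (generate_landscape_key map)

-- ===== LEMMAS AND PROOFS =====

-- proof-side scalar running-maximum step: the effect of pvStepB on one column's entry
def pvStep (o : Option Int) (y : Int) : Option Int :=
  match o with
  | none => some y
  | some h => if y > h then some y else some h

theorem pvStepB_length (hs : List (Option Int)) (m : Int × Int) :
    (pvStepB hs m).length = hs.length := by
  unfold pvStepB
  split
  · split
    · simp
    · split <;> simp
  · rfl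

theorem foldl_pvStepB_length (l : List (Int × Int)) (hs : List (Option Int)) :
    (l.foldl pvStepB hs).length = hs.length := by
  induction l generalizing hs with
  | nil => rfl
  | cons m t ih => simp [List.foldl, ih, pvStepB_length]

theorem state_eq (l : List (Int × Int)) (hs : List (Option Int)) (c : Int)
    (h0 : 0 ≤ c) (h7 : c < 7) (hlen : hs.length = 7) :
    (l.foldl pvStepB hs).getD c.toNat none
      = ((l.filter (fun m => m.2 == c)).map (fun m => m.1)).foldl pvStep (hs.getD c.toNat none) := by
  induction l generalizing hs with
  | nil => rfl
  | cons m t ih =>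
    have hct : c.toNat < hs.length := by omega
    by_cases hc : m.2 = c
    · have hfil : (m.2 == c) = true := by simp [hc]
      have hs' : (pvStepB hs m).getD c.toNat none = pvStep (hs.getD c.toNat none) m.1 := by
        unfold pvStepB
        rw [if_pos (by constructor <;> omega)]
        subst hc
        cases h : hs.getD m.2.toNat none with
        | none => simp [pvStep, List.getD_eq_getElem?_getD, hct]
        | some a =>
          simp only [pvStep]
          split
          · simp [List.getD_eq_getElem?_getD, hct]
          · exact h
      rw [List.foldl_cons, ih (pvStepB hs m) (by rw [pvStepB_length]; exact hlen), hs']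
      simp [hfil]
    · have hfil : (m.2 == c) = false := by simp [hc]
      have hs' : (pvStepB hs m).getD c.toNat none = hs.getD c.toNat none := by
        unfold pvStepB
        split
        · rename_i hin
          have hne : m.2.toNat ≠ c.toNat := by omega
          cases h : hs.getD m.2.toNat none with
          | none => simp [List.getD_eq_getElem?_getD, List.getElem?_set_ne hne]
          | some a =>
            show (if m.1 > a then hs.set m.2.toNat (some m.1) else hs).getD c.toNat none
              = hs.getD c.toNat none
            by_cases hy : m.1 > a
            · rw [if_pos hy]
              simp [List.getD_eq_getElem?_getD, List.getElem?_set_ne hne]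
            · rw [if_neg hy]
        · rfl
      rw [List.foldl_cons, ih (pvStepB hs m) (by rw [pvStepB_length]; exact hlen), hs']
      simp [hfil]

theorem scalar_eq (t : List Int) (a : Int) :
    t.foldl pvStep (some a) = some (t.foldl max a) := by
  induction t generalizing a with
  | nil => rfl
  | cons y t ih =>
    have : pvStep (some a) y = some (max a y) := by
      show (if y > a then some y else some a) = some (max a y)
      by_cases h : y > a
      · rw [if_pos h, max_eq_right (by omega)]
      · rw [if_neg h, max_eq_left (by omega)]
    simp only [List.foldl_cons, this, ih]

theorem colval_eq (ys : List Int) :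
    ((PySem.List.max? ys (fun y => y)).getD (-1)) + 1
      = (match ys.foldl pvStep none with | none => (0 : Int) | some h => h + 1) := by
  cases ys with
  | nil => simp [PySem.List.max?]
  | cons x t =>
    rw [PySem.List.max?_id_cons]
    simp only [List.foldl_cons]
    show t.foldl max x + 1 = (match t.foldl pvStep (some x) with | none => (0 : Int) | some h => h + 1)
    rw [scalar_eq]

theorem key_eq (l : List (Int × Int)) :
    (PySem.List.pyRange 0 7 1).foldl (fun key col =>
        key ++ [((PySem.List.max? ((l.filter (fun m => m.2 == col)).map (fun m => m.1)) (fun y => y)).getD (-1)) + 1]) []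
      = (l.foldl pvStepB (List.replicate 7 (none : Option Int))).map
          (fun h => match h with | none => 0 | some h => h + 1) := by
  have hrange : PySem.List.pyRange 0 7 1 = [0, 1, 2, 3, 4, 5, 6] := by decide
  have hlen : (l.foldl pvStepB (List.replicate 7 (none : Option Int))).length = 7 := by
    simp [foldl_pvStepB_length]
  have hcol : ∀ c : Int, 0 ≤ c → c < 7 →
      ((PySem.List.max? ((l.filter (fun m => m.2 == c)).map (fun m => m.1)) (fun y => y)).getD (-1)) + 1
        = (fun h => match h with | none => 0 | some h => h + 1)
            ((l.foldl pvStepB (List.replicate 7 (none : Option Int))).getD c.toNat none) := by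
    intro c h0 h7
    rw [state_eq l _ c h0 h7 (by simp)]
    have : (List.replicate 7 (none : Option Int)).getD c.toNat none = none := by
      rw [List.getD_eq_getElem?_getD, List.getElem?_replicate]
      split <;> rfl
    rw [this, colval_eq]
  rw [hrange]
  simp only [List.foldl_cons, List.foldl_nil, List.nil_append, List.cons_append]
  rcases h : l.foldl pvStepB (List.replicate 7 (none : Option Int)) with _ | ⟨a0, _ | ⟨a1, _ | ⟨a2, _ | ⟨a3, _ | ⟨a4, _ | ⟨a5, _ | ⟨a6, rest⟩⟩⟩⟩⟩⟩⟩ <;>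
    rw [h] at hlen <;> simp at hlen
  subst hlen
  have e0 := hcol 0 (by norm_num) (by norm_num)
  have e1 := hcol 1 (by norm_num) (by norm_num)
  have e2 := hcol 2 (by norm_num) (by norm_num)
  have e3 := hcol 3 (by norm_num) (by norm_num)
  have e4 := hcol 4 (by norm_num) (by norm_num)
  have e5 := hcol 5 (by norm_num) (by norm_num)
  have e6 := hcol 6 (by norm_num) (by norm_num)
  rw [h] at e0 e1 e2 e3 e4 e5 e6
  simp only [List.getD] at e0 e1 e2 e3 e4 e5 e6
  simp [e0, e1, e2, e3, e4, e5, e6]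

-- ===== VERDICT (by name: the statement is the Claim_ definition above) =====
theorem generate_landscape_key_spec : Claim_equal_generate_landscape_key := by
  intro l _
  unfold Spec_generate_landscape_key generate_landscape_key generate_landscape_key_alt
  rw [key_eq]
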